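-- pv_equiv track=rewrite | github.com/sueszli/vector-database-benchmark | dataset/python-mutated/umask.py | get_numeric_rep_single
-- ===== SOURCE A (Python) =====
-- name_to_value = {'x': 1, 'w': 2, 'r': 4}
--
-- def get_numeric_rep_single(rep):
--     if False:
--         i = 10
--         return i + 15
--     '\n    Given a string representation, return the appropriate octal digit.\n    For example, "rw" becomes 6.\n    '
--     o = 0
--     for sym in set(rep):
--         o += name_to_value[sym]
--     return o
-- ===== SOURCE B (Python) =====
-- name_to_value = {'x': 1, 'w': 2, 'r': 4}
--
-- def get_numeric_rep_single(rep):
--     # Recursive, no set: take the first symbol, add its value once, and recurse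
--     # on the string with every occurrence of that symbol deleted (dedup by removal).
--     if not rep:
--         return 0
--     sym = rep[0]
--     return name_to_value[sym] + get_numeric_rep_single(rep.replace(sym, ''))
-- ===== Notes on version B (the rewrite author's own statement) =====
-- stated objective: alternative
-- what changed: Replaces A's set(rep) construction plus summation loop with structural recursion that deduplicates by removal: add the first symbol's value once and recurse on the string with all occurrences of that symbol deleted.
import Mathlib
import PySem

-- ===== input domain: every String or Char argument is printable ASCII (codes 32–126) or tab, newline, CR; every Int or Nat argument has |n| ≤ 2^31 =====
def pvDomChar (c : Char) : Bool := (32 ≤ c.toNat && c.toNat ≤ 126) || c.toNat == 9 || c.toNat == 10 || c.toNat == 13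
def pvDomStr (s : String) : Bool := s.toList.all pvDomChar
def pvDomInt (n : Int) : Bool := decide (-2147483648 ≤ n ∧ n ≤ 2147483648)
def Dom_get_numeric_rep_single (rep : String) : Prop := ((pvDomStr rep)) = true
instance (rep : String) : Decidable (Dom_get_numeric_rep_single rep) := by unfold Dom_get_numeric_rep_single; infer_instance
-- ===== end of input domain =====

-- B replaces A's set-then-sum loop with structural recursion that deduplicates by removal (alternative decomposition, same cost).


-- ===== PORT A =====
def name_to_value : PySem.Dict Char Int := PySem.Dict.ofList [('x', 1), ('w', 2), ('r', 4)]

-- sum over set(rep); the dict lookup raises KeyError for symbols outside the dict — those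
-- inputs are excluded by Pre_ (lookup is total via getD 0, used only under Pre_).
def get_numeric_rep_single (rep : String) : Int :=
  (PySem.Set.ofList rep.toList).foldl (fun o sym => o + PySem.Dict.getD name_to_value sym 0) 0

-- ===== PORT B =====
-- recursion over the characters: value of the first symbol plus the recursive value of the
-- string with every occurrence of that symbol removed (rep.replace(sym, '') = filter ≠ sym);
-- dict lookup raises KeyError outside the dict — excluded by Pre_ (getD 0, used only under Pre_).
def altGo : List Char → Int
  | [] => 0
  | sym :: t =>
      PySem.Dict.getD name_to_value sym 0
        + altGo (List.filter (fun c => !(c == sym)) (sym :: t))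
termination_by l => l.length
decreasing_by
  simp only [List.filter_cons, beq_self_eq_true, Bool.not_true, List.length_cons]
  exact Nat.lt_succ_of_le (List.length_filter_le _ t)

def get_numeric_rep_single_alt (rep : String) : Int := altGo rep.toList

-- ===== PRECONDITION & SPEC =====
-- Pre_ excludes exactly the inputs on which A raises KeyError: a character other than r/w/x.
def Pre_get_numeric_rep_single (rep : String) : Prop :=
  (rep.toList.all fun c => c == 'r' || c == 'w' || c == 'x') = true
instance (rep : String) : Decidable (Pre_get_numeric_rep_single rep) := by
  unfold Pre_get_numeric_rep_single; infer_instance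

def pvWitness_get_numeric_rep_single : String := "rw"

def Spec_get_numeric_rep_single (rep : String) (out : Int) : Prop := out = get_numeric_rep_single_alt rep
instance (rep : String) (out : Int) : Decidable (Spec_get_numeric_rep_single rep out) := by unfold Spec_get_numeric_rep_single; infer_instance

-- ===== CLAIM (what is proved, stated in full; the proofs are below) =====
def Claim_equal_get_numeric_rep_single : Prop := ∀ (rep : String), Dom_get_numeric_rep_single rep → Pre_get_numeric_rep_single rep → Spec_get_numeric_rep_single rep (get_numeric_rep_single rep)

-- ===== LEMMAS AND PROOFS =====

theorem getD_r : PySem.Dict.getD name_to_value 'r' 0 = 4 := by decide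
theorem getD_w : PySem.Dict.getD name_to_value 'w' 0 = 2 := by decide
theorem getD_x : PySem.Dict.getD name_to_value 'x' 0 = 1 := by decide

-- The summation over any deduplicated rwx-only list is the indicator sum.
theorem foldl_add_rwx (l : List Char) (a : Int) (hnd : l.Nodup)
    (h : ∀ c ∈ l, c = 'r' ∨ c = 'w' ∨ c = 'x') :
    l.foldl (fun o sym => o + PySem.Dict.getD name_to_value sym 0) a
      = a + 4 * (if 'r' ∈ l then (1 : Int) else 0)
          + 2 * (if 'w' ∈ l then (1 : Int) else 0)
          + (if 'x' ∈ l then (1 : Int) else 0) := by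
  induction l generalizing a with
  | nil => simp
  | cons hd t ih =>
    rw [List.nodup_cons] at hnd
    obtain ⟨hhd, hndt⟩ := hnd
    have ht : ∀ c ∈ t, c = 'r' ∨ c = 'w' ∨ c = 'x' := fun c hc => h c (List.mem_cons_of_mem _ hc)
    have hd3 := h hd (List.mem_cons_self)
    have hnotin : hd ∉ t := by simpa using hhd
    rcases hd3 with h1 | h1 | h1 <;> subst h1 <;>
      simp only [List.foldl_cons, getD_r, getD_w, getD_x] <;>
      rw [ih _ hndt ht] <;>
      simp [hnotin, List.mem_cons] <;>
      split_ifs <;> ring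

-- B's recursion also computes the indicator sum on any rwx-only list (duplicates removed at
-- each step, so each symbol is counted once).
theorem altGo_rwx (l : List Char)
    (h : ∀ c ∈ l, c = 'r' ∨ c = 'w' ∨ c = 'x') :
    altGo l
      = 4 * (if 'r' ∈ l then (1 : Int) else 0)
          + 2 * (if 'w' ∈ l then (1 : Int) else 0)
          + (if 'x' ∈ l then (1 : Int) else 0) := by
  revert h
  fun_induction altGo l with
  | case1 => intro _; simp
  | case2 sym t ih =>
    intro h
    have ht : ∀ c ∈ List.filter (fun c => !(c == sym)) (sym :: t),
        c = 'r' ∨ c = 'w' ∨ c = 'x' := by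
      intro c hc
      exact h c (List.mem_of_mem_filter hc)
    have hmemf : ∀ c : Char,
        (c ∈ List.filter (fun c => !(c == sym)) (sym :: t)) ↔ (c ∈ t ∧ c ≠ sym) := by
      intro c
      simp [List.mem_filter]
    rcases h sym (List.mem_cons_self) with h1 | h1 | h1 <;> subst h1 <;>
      rw [ih ht] <;>
      simp only [getD_r, getD_w, getD_x, hmemf, List.mem_cons, Char.reduceEq, ne_eq, not_true,
        not_false_iff, and_true, and_false, true_or, false_or, if_true, if_false] <;>
      split_ifs <;> ring

-- ===== VERDICT (by name: the statement is the Claim_ definition above) =====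
theorem get_numeric_rep_single_spec : Claim_equal_get_numeric_rep_single := by
  intro rep _ hpre
  have hpre' : ∀ c ∈ rep.toList, c = 'r' ∨ c = 'w' ∨ c = 'x' := by
    intro c hc
    have := List.all_eq_true.1 hpre c hc
    simpa [Bool.or_eq_true, beq_iff_eq, or_assoc] using this
  unfold Spec_get_numeric_rep_single get_numeric_rep_single get_numeric_rep_single_alt
  have hnd : (PySem.Set.ofList rep.toList).Nodup := PySem.Set.nodup_ofList _
  have hmem : ∀ c, c ∈ PySem.Set.ofList rep.toList ↔ c ∈ rep.toList := by
    intro c; exact PySem.Set.mem_ofList rep.toList c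
  rw [foldl_add_rwx _ 0 hnd (fun c hc => hpre' c ((hmem c).1 hc)), altGo_rwx _ hpre']
  simp only [hmem]
  ring
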